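-- pv_equiv track=rewrite | github.com/Ananta-dot/PB_POC | z3_instances.py | build_existing_rects
-- ===== SOURCE A (Python) =====
-- from typing import List, Tuple, Dict
--
-- def build_existing_rects(Hp: List[int], Vp: List[int]) -> List[Tuple[Tuple[int,int], Tuple[int,int]]]:
--     firstH, spansH = {}, {}
--     firstV, spansV = {}, {}
--     for i,v in enumerate(Hp):
--         if v>0:
--             if v not in firstH: firstH[v]=i
--             else: spansH[v]=(firstH[v], i)
--     for i,v in enumerate(Vp):
--         if v>0:
--             if v not in firstV: firstV[v]=i
--             else: spansV[v]=(firstV[v], i)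
--     n = max(spansH) if spansH else 0
--     rects=[]
--     for lab in range(1, n+1):
--         (x1,x2),(y1,y2) = spansH[lab], spansV[lab]
--         if x1>x2: x1,x2 = x2,x1
--         if y1>y2: y1,y2 = y2,y1
--         rects.append(((x1,x2),(y1,y2)))
--     return rects
-- ===== SOURCE B (Python) =====
-- from typing import List, Tuple
--
-- def build_existing_rects(Hp: List[int], Vp: List[int]) -> List[Tuple[Tuple[int,int], Tuple[int,int]]]:
--     def span(xs, lab):
--         idx = [i for i, v in enumerate(xs) if v == lab]
--         return (idx[0], idx[-1])
--     labs = [v for v in Hp if v > 0 and Hp.count(v) >= 2]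
--     n = max(labs) if labs else 0
--     return [(span(Hp, lab), span(Vp, lab)) for lab in range(1, n + 1)]
-- ===== Notes on version B (the rewrite author's own statement) =====
-- stated objective: simpler
-- what changed: A's incremental membership-driven construction of first/spans dicts with a swap-normalising output loop is replaced by a direct collect-then-reduce decomposition: gather the index list of each label, take (first, last) per label, and map over range(1, n+1); the never-firing swap branches disappear.
import Mathlib
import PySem

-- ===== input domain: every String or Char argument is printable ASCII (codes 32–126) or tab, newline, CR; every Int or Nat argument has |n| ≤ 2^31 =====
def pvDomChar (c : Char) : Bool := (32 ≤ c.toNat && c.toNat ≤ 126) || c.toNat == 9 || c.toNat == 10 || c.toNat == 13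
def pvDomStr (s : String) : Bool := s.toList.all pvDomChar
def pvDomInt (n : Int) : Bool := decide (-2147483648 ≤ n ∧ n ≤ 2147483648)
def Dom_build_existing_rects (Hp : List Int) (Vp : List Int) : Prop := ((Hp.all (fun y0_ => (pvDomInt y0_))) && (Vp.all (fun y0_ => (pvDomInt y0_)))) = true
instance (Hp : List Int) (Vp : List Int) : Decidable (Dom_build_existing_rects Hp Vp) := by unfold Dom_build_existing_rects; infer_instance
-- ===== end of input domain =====

-- B replaces A's incremental first/else span-building dicts by a direct collect-then-reduce
-- decomposition (indices per label, (first,last) span); objective: simpler.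


-- ===== PORT A =====
-- one iteration of A's 'for i,v in enumerate(...)' loop body over the state (first, spans)
def pvStepA (fs : PySem.Dict Int Int × PySem.Dict Int (Int × Int)) (iv : Int × Int) :
    PySem.Dict Int Int × PySem.Dict Int (Int × Int) :=
  if iv.2 > 0 then
    if fs.1.contains iv.2 = false then (fs.1.insert iv.2 iv.1, fs.2)
    else (fs.1, fs.2.insert iv.2 (fs.1.getD iv.2 0, iv.1))
  else fs

def build_existing_rects (Hp : List Int) (Vp : List Int) : List ((Int × Int) × (Int × Int)) :=
  let hp := (PySem.List.enumerate Hp).foldl pvStepA (PySem.Dict.empty, PySem.Dict.empty)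
  let vp := (PySem.List.enumerate Vp).foldl pvStepA (PySem.Dict.empty, PySem.Dict.empty)
  let spansH := hp.2
  let spansV := vp.2
  let n : Int := match PySem.List.max? spansH.keys (fun x => x) with
                 | some m => m
                 | none => 0
  (PySem.List.pyRange 1 (n + 1)).foldl (fun rects lab =>
    -- Python raises KeyError when lab is missing from spansH/spansV; Pre_ excludes those inputs
    let s1 := spansH.getD lab (0, 0)
    let s2 := spansV.getD lab (0, 0)
    let p1 := if s1.1 > s1.2 then (s1.2, s1.1) else (s1.1, s1.2)
    let p2 := if s2.1 > s2.2 then (s2.2, s2.1) else (s2.1, s2.2)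
    rects ++ [(p1, p2)]) []

-- ===== PORT B =====
-- [i for i, v in enumerate(xs) if v == lab]
def pvOcc (xs : List Int) (lab : Int) : List Int :=
  ((PySem.List.enumerate xs).filter (fun p => p.2 == lab)).map (fun p => p.1)

-- (idx[0], idx[-1]); Python raises IndexError when idx is empty; Pre_ excludes those inputs
def pvSpan (xs : List Int) (lab : Int) : Int × Int :=
  let idx := pvOcc xs lab
  (PySem.List.pyGetD idx 0 0, PySem.List.pyGetD idx (-1) 0)

def build_existing_rects_alt (Hp : List Int) (Vp : List Int) : List ((Int × Int) × (Int × Int)) :=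
  let labs := Hp.filter (fun v => decide (v > 0) && decide (2 ≤ PySem.List.count Hp v))
  let n : Int := match PySem.List.max? labs (fun x => x) with
                 | some m => m
                 | none => 0
  (PySem.List.pyRange 1 (n + 1)).map (fun lab => (pvSpan Hp lab, pvSpan Vp lab))

-- ===== PRECONDITION & SPEC =====
-- Pre_ excludes exactly the inputs on which A raises KeyError: some label between 1 and the
-- largest positive label occurring at least twice in Hp occurs fewer than twice in Hp or in Vp.
-- Phrased as a short-circuiting Bool so it is checkable by evaluation: the guard n ≤ len(Hp)
-- is implied by the per-label condition (n labels each occurring twice need 2n slots), it only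
-- keeps the enumerated range finite when a huge label occurs twice.
def Pre_build_existing_rects (Hp : List Int) (Vp : List Int) : Prop :=
  (decide (PySem.List.maxD (Hp.filter (fun v => decide (v > 0) && decide (2 ≤ PySem.List.count Hp v))) (fun x => x) 0
       ≤ (Hp.length : Int)) &&
   (PySem.List.pyRange 1
      (PySem.List.maxD (Hp.filter (fun v => decide (v > 0) && decide (2 ≤ PySem.List.count Hp v))) (fun x => x) 0 + 1)).all
     (fun lab => decide (2 ≤ Hp.count lab) && decide (2 ≤ Vp.count lab))) = true
instance (Hp : List Int) (Vp : List Int) : Decidable (Pre_build_existing_rects Hp Vp) := by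
  unfold Pre_build_existing_rects; infer_instance

def pvWitness_build_existing_rects : List Int × List Int := ([1, 2, 1, 2], [2, 1, 2, 1, 0])

def Spec_build_existing_rects (Hp : List Int) (Vp : List Int) (out : List ((Int × Int) × (Int × Int))) : Prop := out = build_existing_rects_alt Hp Vp
instance (Hp : List Int) (Vp : List Int) (out : List ((Int × Int) × (Int × Int))) : Decidable (Spec_build_existing_rects Hp Vp out) := by unfold Spec_build_existing_rects; infer_instance

-- ===== CLAIM (what is proved, stated in full; the proofs are below) =====
def Claim_equal_build_existing_rects : Prop := ∀ (Hp : List Int) (Vp : List Int), Dom_build_existing_rects Hp Vp → Pre_build_existing_rects Hp Vp → Spec_build_existing_rects Hp Vp (build_existing_rects Hp Vp)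

-- ===== LEMMAS AND PROOFS =====

theorem pvOcc_append (xs : List Int) (x lab : Int) :
    pvOcc (xs ++ [x]) lab = pvOcc xs lab ++ (if x = lab then [(xs.length : Int)] else []) := by
  simp [pvOcc, PySem.List.enumerate_append, PySem.List.enumerate]
  split_ifs with h <;> simp [h]

theorem pvOcc_length (xs : List Int) (lab : Int) :
    (pvOcc xs lab).length = xs.count lab := by
  induction xs using List.reverseRecOn with
  | nil => simp [pvOcc, PySem.List.enumerate]
  | append_singleton xs x ih =>
      rw [pvOcc_append]
      by_cases h : x = lab <;>
        simp [h, ih, List.count_append]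

theorem pvOcc_nil_iff (xs : List Int) (lab : Int) :
    pvOcc xs lab = [] ↔ lab ∉ xs := by
  rw [← List.length_eq_zero_iff, pvOcc_length, List.count_eq_zero]

theorem pvOcc_pairwise (xs : List Int) (lab : Int) :
    (pvOcc xs lab).Pairwise (· < ·) := by
  exact List.Pairwise.map _ (fun a b h => h)
    ((PySem.List.pairwise_lt_enumerate xs 0).sublist List.filter_sublist)

theorem head_le_getLast_of_pairwise (l : List Int) (h : l ≠ []) (hp : l.Pairwise (· < ·)) :
    l.getD 0 0 ≤ l.getLast h := by
  cases l with
  | nil => exact absurd rfl h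
  | cons a t =>
      rcases List.pairwise_cons.mp hp with ⟨ha, _⟩
      have hm := List.getLast_mem (l := a :: t) h
      simp only [List.getD_cons_zero]
      rcases List.mem_cons.mp hm with he | hmt
      · rw [he]
      · exact le_of_lt (ha _ hmt)

theorem getD_zero_append (l : List Int) (a : Int) (h : l ≠ []) :
    (l ++ [a]).getD 0 0 = l.getD 0 0 := by
  cases l with
  | nil => exact absurd rfl h
  | cons b t => rfl

-- the scan of one array: characterisation of both dicts A's first loop builds
def pvScan (xs : List Int) : PySem.Dict Int Int × PySem.Dict Int (Int × Int) :=
  (PySem.List.enumerate xs).foldl pvStepA (PySem.Dict.empty, PySem.Dict.empty)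

theorem pvScan_append (xs : List Int) (x : Int) :
    pvScan (xs ++ [x]) = pvStepA (pvScan xs) ((xs.length : Int), x) := by
  simp [pvScan, PySem.List.enumerate_append, PySem.List.enumerate, List.foldl_append]

theorem pvScan_inv (xs : List Int) :
    (∀ lab, (pvScan xs).1.get? lab =
        if 0 < lab ∧ lab ∈ xs then some ((pvOcc xs lab).getD 0 0) else none) ∧
    (∀ lab, (pvScan xs).2.get? lab =
        if 0 < lab ∧ 2 ≤ xs.count lab then
          some ((pvOcc xs lab).getD 0 0, (pvOcc xs lab).getLast?.getD 0) else none) ∧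
    (pvScan xs).2.keys.Nodup := by
  induction xs using List.reverseRecOn with
  | nil =>
      refine ⟨fun lab => ?_, fun lab => ?_, ?_⟩ <;>
        simp [pvScan, PySem.List.enumerate, PySem.Dict.get?_empty]
  | append_singleton xs x ih =>
      obtain ⟨ih1, ih2, ih3⟩ := ih
      rw [pvScan_append]
      by_cases hx : x > 0
      · have hcont : (pvScan xs).1.contains x = decide (x ∈ xs) := by
          rw [PySem.Dict.contains_eq_isSome_get?, ih1 x]
          by_cases hm : x ∈ xs <;> simp [hm, hx]
        by_cases hm : x ∈ xs
        · -- second (or later) occurrence of x: spans gets (first, here)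
          have hstep : pvStepA (pvScan xs) ((xs.length : Int), x)
              = ((pvScan xs).1, (pvScan xs).2.insert x ((pvScan xs).1.getD x 0, (xs.length : Int))) := by
            simp [pvStepA, hx, hcont, hm]
          rw [hstep]
          have hocc_ne : pvOcc xs x ≠ [] := by
            rw [Ne, pvOcc_nil_iff]; simpa using hm
          have hcnt : 0 < xs.count x := List.count_pos_iff.mpr hm
          refine ⟨fun lab => ?_, fun lab => ?_, ?_⟩
          · by_cases hlx : lab = x
            · subst hlx
              rw [ih1 lab, pvOcc_append, if_pos rfl, getD_zero_append _ _ hocc_ne]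
              simp [hx, hm]
            · have hxl : ¬ x = lab := fun h => hlx h.symm
              have hmemeq : (lab ∈ xs ++ [x]) = (lab ∈ xs) := by
                simp [List.mem_append, hlx]
              rw [ih1 lab, pvOcc_append, if_neg hxl, List.append_nil]
              simp only [hmemeq]
          · by_cases hlx : lab = x
            · subst hlx
              rw [PySem.Dict.get?_insert_self, pvOcc_append, if_pos rfl,
                  getD_zero_append _ _ hocc_ne]
              have hgd : (pvScan xs).1.getD lab 0 = (pvOcc xs lab).getD 0 0 := by
                simp [PySem.Dict.getD, ih1 lab, hx, hm]
              have hcnt2 : 2 ≤ (xs ++ [lab]).count lab := by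
                simp [List.count_append]; omega
              rw [hgd, if_pos ⟨hx, hcnt2⟩]
              simp
            · have hxl : ¬ x = lab := fun h => hlx h.symm
              have hcnteq : (xs ++ [x]).count lab = xs.count lab := by
                simp [List.count_append, hxl]
              rw [PySem.Dict.get?_insert_of_ne _ _ hlx, ih2 lab, pvOcc_append,
                  if_neg hxl, List.append_nil, hcnteq]
          · by_cases hc2 : (pvScan xs).2.contains x
            · rw [PySem.Dict.keys_insert_of_contains _ _ hc2]; exact ih3
            · rw [PySem.Dict.keys_insert_of_not_contains _ _ (by simpa using hc2)]
              have hnk : x ∉ (pvScan xs).2.keys := by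
                rw [← PySem.Dict.get?_eq_none_iff_not_mem_keys]
                rw [PySem.Dict.contains_eq_isSome_get?] at hc2
                cases h : (pvScan xs).2.get? x with
                | none => rfl
                | some v => rw [h] at hc2; simp at hc2
              have hall : ∀ a ∈ (pvScan xs).2.keys, a ≠ x := fun a ha h => hnk (h ▸ ha)
              simp [List.nodup_append, ih3]
              exact hall
        · -- first occurrence of x: first gets the index
          have hstep : pvStepA (pvScan xs) ((xs.length : Int), x)
              = ((pvScan xs).1.insert x (xs.length : Int), (pvScan xs).2) := by
            simp [pvStepA, hx, hcont, hm]
          rw [hstep]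
          have hocc0 : pvOcc xs x = [] := (pvOcc_nil_iff xs x).mpr hm
          have hcnt0 : xs.count x = 0 := List.count_eq_zero.mpr hm
          refine ⟨fun lab => ?_, fun lab => ?_, ih3⟩
          · by_cases hlx : lab = x
            · subst hlx
              rw [PySem.Dict.get?_insert_self, pvOcc_append, if_pos rfl, hocc0]
              simp [hx]
            · have hxl : ¬ x = lab := fun h => hlx h.symm
              have hmemeq : (lab ∈ xs ++ [x]) = (lab ∈ xs) := by
                simp [List.mem_append, hlx]
              rw [PySem.Dict.get?_insert_of_ne _ _ hlx, ih1 lab, pvOcc_append,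
                  if_neg hxl, List.append_nil]
              simp only [hmemeq]
          · by_cases hlx : lab = x
            · subst hlx
              have hcnteq : (xs ++ [lab]).count lab = 1 := by
                simp [List.count_append, hcnt0]
              have cL : ¬ (0 < lab ∧ 2 ≤ xs.count lab) := by intro h; omega
              have cR : ¬ (0 < lab ∧ 2 ≤ (xs ++ [lab]).count lab) := by intro h; omega
              rw [ih2 lab, if_neg cL, if_neg cR]
            · have hxl : ¬ x = lab := fun h => hlx h.symm
              have hcnteq : (xs ++ [x]).count lab = xs.count lab := by
                simp [List.count_append, hxl]
              rw [ih2 lab, pvOcc_append, if_neg hxl, List.append_nil, hcnteq]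
      · -- x ≤ 0: nothing changes
        have hstep : pvStepA (pvScan xs) ((xs.length : Int), x) = pvScan xs := by
          simp [pvStepA, hx]
        rw [hstep]
        refine ⟨fun lab => ?_, fun lab => ?_, ih3⟩
        · by_cases h0 : 0 < lab
          · have hxl : ¬ x = lab := fun h => hx (h ▸ h0)
            have hlx : ¬ lab = x := fun h => hxl h.symm
            have hmemeq : (lab ∈ xs ++ [x]) = (lab ∈ xs) := by
              simp [List.mem_append, hlx]
            rw [ih1 lab, pvOcc_append, if_neg hxl, List.append_nil]
            simp only [hmemeq]
          · rw [ih1 lab, if_neg (by tauto), if_neg (by tauto)]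
        · by_cases h0 : 0 < lab
          · have hxl : ¬ x = lab := fun h => hx (h ▸ h0)
            have hcnteq : (xs ++ [x]).count lab = xs.count lab := by
              simp [List.count_append, hxl]
            rw [ih2 lab, pvOcc_append, if_neg hxl, List.append_nil, hcnteq]
          · rw [ih2 lab, if_neg (by tauto), if_neg (by tauto)]

theorem pv_max?_congr (l1 l2 : List Int) (h : ∀ x : Int, x ∈ l1 ↔ x ∈ l2) :
    PySem.List.max? l1 (fun x => x) = PySem.List.max? l2 (fun x => x) := by
  cases h1 : PySem.List.max? l1 (fun x => x) with
  | none =>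
      rw [PySem.List.max?_eq_none_iff] at h1
      symm
      rw [PySem.List.max?_eq_none_iff]
      rw [List.eq_nil_iff_forall_not_mem] at h1 ⊢
      exact fun x hx => h1 x ((h x).mpr hx)
  | some m =>
      cases h2 : PySem.List.max? l2 (fun x => x) with
      | none =>
          rw [PySem.List.max?_eq_none_iff] at h2
          exact absurd ((h m).mp (PySem.List.max?_mem h1)) (by simp [h2])
      | some m' =>
          have hle : m ≤ m' := PySem.List.max?_isMax h2 m ((h m).mp (PySem.List.max?_mem h1))
          have hge : m' ≤ m := PySem.List.max?_isMax h1 m' ((h m').mpr (PySem.List.max?_mem h2))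
          rw [le_antisymm hle hge]

theorem pvScan_keys_mem (xs : List Int) (k : Int) :
    k ∈ (pvScan xs).2.keys ↔ (0 < k ∧ 2 ≤ xs.count k) := by
  have hinv := (pvScan_inv xs).2.1 k
  constructor
  · intro hk
    by_contra hc
    rw [if_neg hc] at hinv
    exact (PySem.Dict.get?_eq_none_iff_not_mem_keys _ _).mp hinv hk
  · intro hk
    rw [if_pos hk] at hinv
    by_contra hc
    rw [(PySem.Dict.get?_eq_none_iff_not_mem_keys _ _).mpr hc] at hinv
    simp at hinv

theorem pvLabs_mem (Hp : List Int) (k : Int) :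
    k ∈ Hp.filter (fun v => decide (v > 0) && decide (2 ≤ PySem.List.count Hp v)) ↔
      (0 < k ∧ 2 ≤ Hp.count k) := by
  rw [List.mem_filter]
  simp only [PySem.List.count_eq, Bool.and_eq_true, decide_eq_true_eq]
  constructor
  · rintro ⟨_, h1, h2⟩; exact ⟨h1, h2⟩
  · rintro ⟨h1, h2⟩
    exact ⟨List.count_pos_iff.mp (by omega), h1, h2⟩

theorem pvOcc_ne_nil (xs : List Int) (lab : Int) (h2 : 2 ≤ xs.count lab) :
    pvOcc xs lab ≠ [] := by
  intro h
  have := pvOcc_length xs lab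
  rw [h] at this
  simp at this
  omega

theorem pvSpan_eq (xs : List Int) (lab : Int) (h2 : 2 ≤ xs.count lab) :
    pvSpan xs lab = ((pvOcc xs lab).getD 0 0, (pvOcc xs lab).getLast?.getD 0) := by
  have hne := pvOcc_ne_nil xs lab h2
  simp only [pvSpan, PySem.List.pyGetD_zero, PySem.List.pyGetD_neg_one _ _ hne]
  rw [List.getLast?_eq_some_getLast hne]
  rfl

theorem pvOcc_head_le_last (xs : List Int) (lab : Int) (h2 : 2 ≤ xs.count lab) :
    (pvOcc xs lab).getD 0 0 ≤ (pvOcc xs lab).getLast?.getD 0 := by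
  have hne := pvOcc_ne_nil xs lab h2
  rw [List.getLast?_eq_some_getLast hne]
  exact head_le_getLast_of_pairwise _ hne (pvOcc_pairwise xs lab)

theorem pvScan_getD (xs : List Int) (lab : Int) (h0 : 0 < lab) (h2 : 2 ≤ xs.count lab) :
    (pvScan xs).2.getD lab (0, 0) = ((pvOcc xs lab).getD 0 0, (pvOcc xs lab).getLast?.getD 0) := by
  have hinv := (pvScan_inv xs).2.1 lab
  rw [if_pos ⟨h0, h2⟩] at hinv
  simp [PySem.Dict.getD, hinv]

-- ===== VERDICT (by name: the statement is the Claim_ definition above) =====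
theorem build_existing_rects_spec : Claim_equal_build_existing_rects := by
  intro Hp Vp _ hpre
  unfold Spec_build_existing_rects
  simp only [build_existing_rects, build_existing_rects_alt]
  have hfold : ∀ xs : List Int,
      List.foldl pvStepA (PySem.Dict.empty, PySem.Dict.empty) (PySem.List.enumerate xs) = pvScan xs :=
    fun _ => rfl
  rw [PySem.List.foldl_append_singleton_eq_map, List.nil_append, hfold Hp, hfold Vp]
  have hkeys : ∀ k : Int,
      k ∈ (pvScan Hp).2.keys ↔
        k ∈ Hp.filter (fun v => decide (v > 0) && decide (2 ≤ PySem.List.count Hp v)) :=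
    fun k => (pvScan_keys_mem Hp k).trans (pvLabs_mem Hp k).symm
  rw [pv_max?_congr _ _ hkeys]
  apply List.map_congr_left
  intro lab hmem
  rw [PySem.List.mem_pyRange_one] at hmem
  unfold Pre_build_existing_rects at hpre
  rw [Bool.and_eq_true, List.all_eq_true] at hpre
  have hpre' := hpre.2 lab (by
    rw [PySem.List.mem_pyRange_one]
    have : PySem.List.maxD
        (Hp.filter (fun v => decide (v > 0) && decide (2 ≤ PySem.List.count Hp v))) (fun x => x) 0
        = (match PySem.List.max?
            (Hp.filter (fun v => decide (v > 0) && decide (2 ≤ PySem.List.count Hp v))) (fun x => x) with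
           | some m => m
           | none => 0) := by
      unfold PySem.List.maxD
      cases PySem.List.max?
          (Hp.filter (fun v => decide (v > 0) && decide (2 ≤ PySem.List.count Hp v))) (fun x => x) <;> rfl
    rw [this]
    exact hmem)
  rw [Bool.and_eq_true, decide_eq_true_eq, decide_eq_true_eq] at hpre'
  obtain ⟨hcH, hcV⟩ := hpre'
  have h0 : (0 : Int) < lab := by omega
  rw [pvScan_getD Hp lab h0 hcH, pvScan_getD Vp lab h0 hcV,
      pvSpan_eq Hp lab hcH, pvSpan_eq Vp lab hcV]
  rw [if_neg (not_lt.mpr (pvOcc_head_le_last Hp lab hcH)),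
      if_neg (not_lt.mpr (pvOcc_head_le_last Vp lab hcV))]
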